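-- pv_equiv track=rewrite | github.com/safurrier/ci-fail | ci_fail/api.py | _count_check_states
-- ===== SOURCE A (Python) =====
-- from typing import Any, Optional
--
-- def _count_check_states(
--     checks: list[dict[str, Any]],
-- ) -> tuple[int, int, int, int, int, int, int, int]:
--     """Count checks by state.
--
--     Args:
--         checks: List of check dictionaries from GitHub API
--
--     Returns:
--         Tuple of (running, passed, failed, neutral, cancelled, skipped, timed_out, buildkite)
--     """
--     running = sum(1 for c in checks if c.get("state") in ("IN_PROGRESS", "PENDING"))
--     passed = sum(1 for c in checks if c.get("state") == "SUCCESS")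
--     failed = sum(1 for c in checks if c.get("state") == "FAILURE")
--     neutral = sum(1 for c in checks if c.get("state") == "NEUTRAL")
--     cancelled = sum(1 for c in checks if c.get("state") == "CANCELLED")
--     skipped = sum(1 for c in checks if c.get("state") == "SKIPPED")
--     timed_out = sum(1 for c in checks if c.get("state") == "TIMED_OUT")
--     buildkite = sum(1 for c in checks if "buildkite" in c.get("link", ""))
--     return running, passed, failed, neutral, cancelled, skipped, timed_out, buildkite
-- ===== SOURCE B (Python) =====
-- from collections import Counter
-- from typing import Any
--
--
-- def _count_check_states(
--     checks: list[dict[str, Any]],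
-- ) -> tuple[int, int, int, int, int, int, int, int]:
--     """Single-pass tabulation of states, then lookups; buildkite counted separately."""
--     counts = Counter(c.get("state") for c in checks)
--     buildkite = sum(1 for c in checks if "buildkite" in c.get("link", ""))
--     return (
--         counts["IN_PROGRESS"] + counts["PENDING"],
--         counts["SUCCESS"],
--         counts["FAILURE"],
--         counts["NEUTRAL"],
--         counts["CANCELLED"],
--         counts["SKIPPED"],
--         counts["TIMED_OUT"],
--         buildkite,
--     )
-- ===== Notes on version B (the rewrite author's own statement) =====
-- stated objective: simpler
-- what changed: Replaces A's seven separate scans over checks (one per state test) with a single pass building a Counter of states, from which each state count is a dict lookup; only the buildkite-link sum remains its own pass.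
import Mathlib
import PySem

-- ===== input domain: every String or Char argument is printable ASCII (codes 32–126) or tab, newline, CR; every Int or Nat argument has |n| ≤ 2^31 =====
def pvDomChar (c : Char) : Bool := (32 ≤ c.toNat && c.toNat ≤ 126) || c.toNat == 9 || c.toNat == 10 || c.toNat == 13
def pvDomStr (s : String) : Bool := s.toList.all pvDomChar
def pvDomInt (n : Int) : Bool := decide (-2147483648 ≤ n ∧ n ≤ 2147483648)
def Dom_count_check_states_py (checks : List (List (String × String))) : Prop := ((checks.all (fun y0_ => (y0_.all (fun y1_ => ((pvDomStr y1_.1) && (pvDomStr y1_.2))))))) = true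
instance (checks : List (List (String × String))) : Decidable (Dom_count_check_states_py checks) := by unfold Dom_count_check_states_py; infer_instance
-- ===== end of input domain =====

-- B replaces A's seven separate scans (one per state test) with one Counter-building
-- pass plus dict lookups; same return values (objective: simpler).

-- ===== PORT A =====
-- A: eight independent generator sums over checks, ported as eight foldl counting loops.
def count_check_states_py (checks : List (List (String × String))) : Int × Int × Int × Int × Int × Int × Int × Int :=
  let running : Int := checks.foldl (fun acc c => if (PySem.Dict.mk c).get? "state" = some "IN_PROGRESS" ∨ (PySem.Dict.mk c).get? "state" = some "PENDING" then acc + 1 else acc) 0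
  let passed : Int := checks.foldl (fun acc c => if (PySem.Dict.mk c).get? "state" = some "SUCCESS" then acc + 1 else acc) 0
  let failed : Int := checks.foldl (fun acc c => if (PySem.Dict.mk c).get? "state" = some "FAILURE" then acc + 1 else acc) 0
  let neutral : Int := checks.foldl (fun acc c => if (PySem.Dict.mk c).get? "state" = some "NEUTRAL" then acc + 1 else acc) 0
  let cancelled : Int := checks.foldl (fun acc c => if (PySem.Dict.mk c).get? "state" = some "CANCELLED" then acc + 1 else acc) 0
  let skipped : Int := checks.foldl (fun acc c => if (PySem.Dict.mk c).get? "state" = some "SKIPPED" then acc + 1 else acc) 0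
  let timed_out : Int := checks.foldl (fun acc c => if (PySem.Dict.mk c).get? "state" = some "TIMED_OUT" then acc + 1 else acc) 0
  let buildkite : Int := checks.foldl (fun acc c => if PySem.Str.isIn "buildkite" ((PySem.Dict.mk c).getD "link" "") then acc + 1 else acc) 0
  (running, passed, failed, neutral, cancelled, skipped, timed_out, buildkite)

-- ===== PORT B =====
-- B: Counter of the states (one pass), then lookups; buildkite is its own sum.
def count_check_states_py_alt (checks : List (List (String × String))) : Int × Int × Int × Int × Int × Int × Int × Int :=
  let counts := PySem.Dict.counter (checks.map (fun c => (PySem.Dict.mk c).get? "state"))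
  let buildkite : Int := checks.foldl (fun acc c => if PySem.Str.isIn "buildkite" ((PySem.Dict.mk c).getD "link" "") then acc + 1 else acc) 0
  (counts.getD (some "IN_PROGRESS") 0 + counts.getD (some "PENDING") 0,
   counts.getD (some "SUCCESS") 0,
   counts.getD (some "FAILURE") 0,
   counts.getD (some "NEUTRAL") 0,
   counts.getD (some "CANCELLED") 0,
   counts.getD (some "SKIPPED") 0,
   counts.getD (some "TIMED_OUT") 0,
   buildkite)

-- ===== PRECONDITION & SPEC =====
def Spec_count_check_states_py (checks : List (List (String × String))) (out : Int × Int × Int × Int × Int × Int × Int × Int) : Prop := out = count_check_states_py_alt checks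
instance (checks : List (List (String × String))) (out : Int × Int × Int × Int × Int × Int × Int × Int) : Decidable (Spec_count_check_states_py checks out) := by
  unfold Spec_count_check_states_py
  have h2 : DecidableEq (Int × Int) := inferInstance
  have h3 : DecidableEq (Int × Int × Int) := inferInstance
  have h4 : DecidableEq (Int × Int × Int × Int) := inferInstance
  have h5 : DecidableEq (Int × Int × Int × Int × Int) := inferInstance
  have h6 : DecidableEq (Int × Int × Int × Int × Int × Int) := inferInstance
  have h7 : DecidableEq (Int × Int × Int × Int × Int × Int × Int) := inferInstance
  have h8 : DecidableEq (Int × Int × Int × Int × Int × Int × Int × Int) := inferInstance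
  exact h8 _ _

-- ===== CLAIM (what is proved, stated in full; the proofs are below) =====
def Claim_equal_count_check_states_py : Prop := ∀ (checks : List (List (String × String))), Dom_count_check_states_py checks → Spec_count_check_states_py checks (count_check_states_py checks)

-- ===== LEMMAS AND PROOFS =====

-- a Counter lookup equals the single-state counting loop of A
set_option maxRecDepth 4096 in
theorem counter_eq_loop (checks : List (List (String × String))) (v : String) :
    (PySem.Dict.counter (checks.map (fun c => (PySem.Dict.mk c).get? "state"))).getD (some v) 0
    = checks.foldl (fun acc c => if (PySem.Dict.mk c).get? "state" = some v then acc + 1 else acc) (0 : Int) := by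
  rw [PySem.Dict.getD_counter, PySem.List.foldl_ite_add_one]
  rw [zero_add]
  norm_cast
  rw [List.count_eq_countP, List.countP_map]
  refine List.countP_congr (fun x _ => ?_)
  simp only [Function.comp_apply, beq_iff_eq]
  exact (decide_eq_true_iff).symm

-- counting a disjunction of two distinct states splits into two counts
theorem loop_or_split (checks : List (List (String × String))) :
    checks.foldl (fun acc c => if (PySem.Dict.mk c).get? "state" = some "IN_PROGRESS" ∨ (PySem.Dict.mk c).get? "state" = some "PENDING" then acc + 1 else acc) (0 : Int)
    = checks.foldl (fun acc c => if (PySem.Dict.mk c).get? "state" = some "IN_PROGRESS" then acc + 1 else acc) (0 : Int)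
      + checks.foldl (fun acc c => if (PySem.Dict.mk c).get? "state" = some "PENDING" then acc + 1 else acc) (0 : Int) := by
  simp only [PySem.List.foldl_ite_add_one]
  have : ∀ (l : List (List (String × String))),
      l.countP (fun c => decide ((PySem.Dict.mk c).get? "state" = some "IN_PROGRESS" ∨ (PySem.Dict.mk c).get? "state" = some "PENDING"))
      = l.countP (fun c => decide ((PySem.Dict.mk c).get? "state" = some "IN_PROGRESS"))
        + l.countP (fun c => decide ((PySem.Dict.mk c).get? "state" = some "PENDING")) := by
    intro l
    induction l with
    | nil => simp
    | cons x xs ih =>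
      simp only [List.countP_cons, ih]
      by_cases h1 : (PySem.Dict.mk x).get? "state" = some "IN_PROGRESS" <;>
        by_cases h2 : (PySem.Dict.mk x).get? "state" = some "PENDING" <;>
        simp_all <;> omega
  rw [this]
  push_cast
  ring

-- ===== VERDICT (by name: the statement is the Claim_ definition above) =====
theorem count_check_states_py_spec : Claim_equal_count_check_states_py := by
  intro checks _
  unfold Spec_count_check_states_py count_check_states_py count_check_states_py_alt
  simp only [counter_eq_loop, loop_or_split]
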